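-- pv_equiv track=rewrite | github.com/toddwbucy/HADES | core/analyzers/rust_symbol_extractor.py | _split_respecting_braces
-- ===== SOURCE A (Python) =====
-- def _split_respecting_braces(s: str) -> list[str]:
--     """Split a string on commas, but respect nested ``{...}`` groups."""
--     parts: list[str] = []
--     depth = 0
--     current: list[str] = []
--
--     for ch in s:
--         if ch == "{":
--             depth += 1
--             current.append(ch)
--         elif ch == "}":
--             depth -= 1
--             current.append(ch)
--         elif ch == "," and depth == 0:
--             parts.append("".join(current))
--             current = []
--         else:
--             current.append(ch)
--
--     if current:
--         parts.append("".join(current))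
--
--     return parts
-- ===== SOURCE B (Python) =====
-- def _split_respecting_braces(s: str) -> list[str]:
--     """Two staged passes: first collect the indices of top-level commas,
--     then slice the string between consecutive cut points; finally drop a
--     trailing empty piece (a trailing top-level comma produces none)."""
--     cuts = []
--     depth = 0
--     for i, ch in enumerate(s):
--         if ch == "{":
--             depth += 1
--         elif ch == "}":
--             depth -= 1
--         elif ch == "," and depth == 0:
--             cuts.append(i)
--     parts = []
--     prev = -1
--     for c in cuts + [len(s)]:
--         parts.append(s[prev + 1:c])
--         prev = c
--     if parts[-1] == "":
--         parts.pop()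
--     return parts
-- ===== Notes on version B (the rewrite author's own statement) =====
-- stated objective: alternative
-- what changed: B replaces A's single pass that accumulates per-segment character buffers with two staged passes: one that only records the indices of top-level commas, and a second that slices the original string between consecutive cut points, finally dropping a trailing empty slice.
import Mathlib
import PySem

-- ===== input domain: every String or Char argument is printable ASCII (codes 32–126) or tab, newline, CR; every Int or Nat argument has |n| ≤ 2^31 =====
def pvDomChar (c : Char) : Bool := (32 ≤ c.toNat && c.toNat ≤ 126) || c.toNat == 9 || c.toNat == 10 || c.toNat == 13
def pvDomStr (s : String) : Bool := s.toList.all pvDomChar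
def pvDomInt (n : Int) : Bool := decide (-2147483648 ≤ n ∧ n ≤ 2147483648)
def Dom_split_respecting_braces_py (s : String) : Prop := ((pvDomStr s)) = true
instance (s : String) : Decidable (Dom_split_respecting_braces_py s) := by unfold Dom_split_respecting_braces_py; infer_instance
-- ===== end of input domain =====

-- B replaces A's single pass accumulating per-segment character buffers with two staged
-- passes: collect the indices of top-level commas, then slice the original string between
-- consecutive cut points and drop a trailing empty slice; objective: alternative.

-- ===== PORT A =====
-- one loop step of A: state = (parts, depth, current)
def pvStepA (st : List String × Int × List Char) (ch : Char) : List String × Int × List Char :=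
  match st with
  | (parts, depth, current) =>
    if ch = '{' then (parts, depth + 1, current ++ [ch])
    else if ch = '}' then (parts, depth - 1, current ++ [ch])
    else if ch = ',' ∧ depth = 0 then (parts ++ [String.ofList current], depth, [])
    else (parts, depth, current ++ [ch])

def split_respecting_braces_py (s : String) : List String :=
  let st := s.toList.foldl pvStepA ([], 0, [])
  if st.2.2 ≠ [] then st.1 ++ [String.ofList st.2.2] else st.1

-- ===== PORT B =====
-- pass 1 step: record indices of top-level commas; state = (cuts, depth), p from enumerate
def pvCutStep (st : List Int × Int) (p : Int × Char) : List Int × Int :=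
  if p.2 = '{' then (st.1, st.2 + 1)
  else if p.2 = '}' then (st.1, st.2 - 1)
  else if p.2 = ',' ∧ st.2 = 0 then (st.1 ++ [p.1], st.2)
  else st

-- pass 2 step: slice cs between consecutive cut points; state = (parts, prev)
def pvSliceStep (cs : List Char) (st : List String × Int) (c : Int) : List String × Int :=
  (st.1 ++ [String.ofList (PySem.List.slice cs (some (st.2 + 1)) (some c))], c)

def split_respecting_braces_py_alt (s : String) : List String :=
  let cs := s.toList
  let cuts := ((PySem.List.enumerate cs 0).foldl pvCutStep ([], 0)).1
  let parts := ((cuts ++ [(cs.length : Int)]).foldl (pvSliceStep cs) ([], -1)).1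
  if parts.getLast? = some "" then parts.dropLast else parts

-- ===== PRECONDITION & SPEC =====
def Spec_split_respecting_braces_py (s : String) (out : List String) : Prop := out = split_respecting_braces_py_alt s
instance (s : String) (out : List String) : Decidable (Spec_split_respecting_braces_py s out) := by unfold Spec_split_respecting_braces_py; infer_instance

-- ===== CLAIM (what is proved, stated in full; the proofs are below) =====
def Claim_equal_split_respecting_braces_py : Prop := ∀ (s : String), Dom_split_respecting_braces_py s → Spec_split_respecting_braces_py s (split_respecting_braces_py s)

-- ===== LEMMAS AND PROOFS =====


-- one step of pass 2 peeled off the back of the cut list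
theorem pv_foldl_concat (cs : List Char) (cuts : List Int) (st : List String × Int) (c : Int) :
    (cuts ++ [c]).foldl (pvSliceStep cs) st
      = ((cuts.foldl (pvSliceStep cs) st).1
          ++ [String.ofList (PySem.List.slice cs (some ((cuts.foldl (pvSliceStep cs) st).2 + 1)) (some c))], c) := by
  rw [List.foldl_concat]; rfl

-- loop invariant: A's fold state corresponds to B's cut list rendered by pass 2;
-- A's parts are the rendered cuts, A's buffer is the string dropped at (last cut + 1)
theorem pv_inv (rest : List Char) : ∀ (pre : List Char) (cuts : List Int) (depth : Int)
    (start : Nat), start ≤ pre.length →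
    (cuts.foldl (pvSliceStep (pre ++ rest)) ([], -1)).2 + 1 = (start : Int) →
    ∃ start' : Nat, start' ≤ (pre ++ rest).length ∧
      ((((PySem.List.enumerate rest (pre.length : Int)).foldl pvCutStep (cuts, depth)).1.foldl
          (pvSliceStep (pre ++ rest)) ([], -1)).2 + 1 = (start' : Int)) ∧
      rest.foldl pvStepA ((cuts.foldl (pvSliceStep (pre ++ rest)) ([], -1)).1, depth, pre.drop start)
        = ((((PySem.List.enumerate rest (pre.length : Int)).foldl pvCutStep (cuts, depth)).1.foldl
              (pvSliceStep (pre ++ rest)) ([], -1)).1,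
           ((PySem.List.enumerate rest (pre.length : Int)).foldl pvCutStep (cuts, depth)).2,
           (pre ++ rest).drop start') := by
  induction rest with
  | nil =>
    intro pre cuts depth start h hprev
    exact ⟨start, by simpa using h, by simpa using hprev, by simp⟩
  | cons ch rest ih =>
    intro pre cuts depth start h hprev
    have hdrop : (pre ++ [ch]).drop start = pre.drop start ++ [ch] :=
      List.drop_append_of_le_length h
    have hassoc : pre ++ ch :: rest = (pre ++ [ch]) ++ rest := by simp
    have hlen : ((pre ++ [ch]).length : Int) = (pre.length : Int) + 1 := by simp
    rw [PySem.List.enumerate_cons, List.foldl_cons, List.foldl_cons]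
    by_cases h1 : ch = '{'
    · simp only [pvStepA, pvCutStep, if_pos h1]
      rw [hassoc, ← hlen, ← hdrop]
      exact ih (pre ++ [ch]) cuts (depth + 1) start (by simp; omega) (hassoc ▸ hprev)
    · by_cases h2 : ch = '}'
      · simp only [pvStepA, pvCutStep, if_neg h1, if_pos h2]
        rw [hassoc, ← hlen, ← hdrop]
        exact ih (pre ++ [ch]) cuts (depth - 1) start (by simp; omega) (hassoc ▸ hprev)
      · by_cases h3 : ch = ',' ∧ depth = 0
        · simp only [pvStepA, pvCutStep, if_neg h1, if_neg h2, if_pos h3]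
          have hslice : PySem.List.slice (pre ++ ch :: rest) (some (start : Int)) (some (pre.length : Int))
              = pre.drop start := by
            rw [PySem.List.slice_natCast]
            rw [List.drop_append_of_le_length h]
            have hl : (pre.drop start).length = pre.length - start := List.length_drop
            rw [← hl, List.take_left]
          -- rendering the extended cut list appends exactly A's finished buffer
          have hrender : ((cuts ++ [(pre.length : Int)]).foldl (pvSliceStep (pre ++ ch :: rest)) ([], -1))
              = ((cuts.foldl (pvSliceStep (pre ++ ch :: rest)) ([], -1)).1
                  ++ [String.ofList (pre.drop start)], (pre.length : Int)) := by
            rw [pv_foldl_concat, hprev, hslice]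
          have h4 := ih (pre ++ [ch]) (cuts ++ [(pre.length : Int)]) depth
            ((pre ++ [ch]).length)
            (le_refl _)
            (by rw [← hassoc, hrender]; simp)
          rw [List.drop_length] at h4
          rw [hassoc] at hrender
          rw [hrender] at h4
          have hcast : ((pre.length : Int) + 1) = (((pre ++ [ch]).length : Nat) : Int) := by simp
          rw [hassoc, hcast]
          exact h4
        · simp only [pvStepA, pvCutStep, if_neg h1, if_neg h2, if_neg h3]
          rw [hassoc, ← hlen, ← hdrop]
          exact ih (pre ++ [ch]) cuts depth start (by simp; omega) (hassoc ▸ hprev)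

theorem pv_ofList_empty_iff (l : List Char) : String.ofList l = "" ↔ l = [] := by
  constructor
  · intro hl
    have := congrArg String.toList hl
    simpa using this
  · intro hl; subst hl; rfl

theorem pv_final (s : String) : split_respecting_braces_py s = split_respecting_braces_py_alt s := by
  unfold split_respecting_braces_py split_respecting_braces_py_alt
  dsimp only
  obtain ⟨start', hle, hprev, heq⟩ := pv_inv s.toList [] [] 0 0 (by simp) (by simp)
  simp only [List.nil_append, List.length_nil, Nat.cast_zero, List.foldl_nil, List.drop_nil] at hprev heq hle
  have hslice : PySem.List.slice s.toList (some (start' : Int)) (some (s.toList.length : Int))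
      = s.toList.drop start' := by
    rw [PySem.List.slice_natCast]
    exact List.take_of_length_le (by rw [List.length_drop])
  rw [heq, pv_foldl_concat, hprev, hslice]
  dsimp only
  rw [List.getLast?_concat, List.dropLast_concat]
  by_cases hd : s.toList.drop start' = []
  · rw [hd]
    simp
  · rw [if_pos hd, if_neg]
    intro hcon
    exact hd ((pv_ofList_empty_iff _).mp (Option.some.inj hcon))

-- ===== VERDICT (by name: the statement is the Claim_ definition above) =====
theorem split_respecting_braces_py_spec : Claim_equal_split_respecting_braces_py := by
  intro s _
  exact (pv_final s).symm ▸ rfl
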